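-- pv_equiv track=rewrite | github.com/CKCHDX/klar | engine/search_engine.py | filter_relevant_links
-- ===== SOURCE A (Python) =====
-- from typing import List, Dict, Set, Tuple, Optional
--
-- def filter_relevant_links(links: List[str], query: str, expanded_terms: List[str]) -> List[str]:
--     """Filter links using both original query and SVEN expanded terms"""
--     all_terms = set([query.lower()] + [t.lower() for t in expanded_terms])
--     scored_links = []
--
--     for link in links:
--         url_lower = link.lower()
--         score = 0
--
--         # Check if any term appears in URL
--         for term in all_terms:
--             if term in url_lower:
--                 score += 2
--
--         # Prefer paths over parameters
--         if '?' not in link: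
--             score += 1
--
--         # Prefer shorter paths (usually more specific)
--         path_depth = url_lower.count('/')
--         if 3 <= path_depth <= 5:
--             score += 1
--
--         if score > 0:
--             scored_links.append((score, link))
--
--     # Sort by score
--     scored_links.sort(reverse=True, key=lambda x: x[0])
--
--     return [link for score, link in scored_links]
-- ===== SOURCE B (Python) =====
-- def filter_relevant_links(links, query, expanded_terms):
--     """Filter links using both original query and SVEN expanded terms"""
--     terms = {query.lower()} | {t.lower() for t in expanded_terms}
--     scores = [
--         2 * sum(1 for t in terms if t in link.lower())
--         + ('?' not in link)
--         + (3 <= link.lower().count('/') <= 5)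
--         for link in links
--     ]
--     best = max(scores, default=0)
--     return [link for s in range(best, 0, -1)
--                  for link, sc in zip(links, scores) if sc == s]
-- ===== Notes on version B (the rewrite author's own statement) =====
-- stated objective: alternative
-- what changed: B scores each link arithmetically (2*count of matching terms plus two 0/1 bonuses) in one comprehension, takes the maximum score, and emits links by repeated filter passes over zip(links, scores) for each score from max down to 1, replacing A's collect-(score,link)-tuples-then-stable-comparison-sort while preserving tie order.
import Mathlib
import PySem

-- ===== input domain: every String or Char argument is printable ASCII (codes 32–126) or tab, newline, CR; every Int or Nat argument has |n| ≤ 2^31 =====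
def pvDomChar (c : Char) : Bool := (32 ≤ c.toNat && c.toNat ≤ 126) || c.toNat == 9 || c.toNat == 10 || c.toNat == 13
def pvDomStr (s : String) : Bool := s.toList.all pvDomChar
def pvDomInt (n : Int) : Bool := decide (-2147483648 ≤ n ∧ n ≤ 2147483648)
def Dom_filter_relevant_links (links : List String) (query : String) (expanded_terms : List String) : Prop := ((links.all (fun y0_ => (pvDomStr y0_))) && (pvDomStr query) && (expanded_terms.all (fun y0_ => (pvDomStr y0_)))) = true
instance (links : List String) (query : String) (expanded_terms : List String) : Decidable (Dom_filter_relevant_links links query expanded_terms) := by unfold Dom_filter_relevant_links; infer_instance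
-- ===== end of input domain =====

-- B scores each link arithmetically in one comprehension and emits links by repeated
-- filter passes for each score from the maximum down to 1, instead of A's
-- collect-(score,link)-tuples-then-stable-sort. Return value only; neither mutates.

-- ===== PORT A =====
-- A's per-link scoring loop: +2 per term in the lowered link, +1 if no '?', +1 if 3 ≤ count('/') ≤ 5
def pvScoreA (all_terms : List String) (link : String) : Int :=
  let url_lower := PySem.Str.lower link
  let score : Int := all_terms.foldl (fun s term => if PySem.Str.isIn term url_lower then s + 2 else s) 0
  let score := if ¬ (PySem.Str.isIn "?" link = true) then score + 1 else score
  let path_depth := PySem.Str.count url_lower "/"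
  if 3 ≤ path_depth ∧ path_depth ≤ 5 then score + 1 else score

def filter_relevant_links (links : List String) (query : String) (expanded_terms : List String) : List String :=
  let all_terms := PySem.Set.ofList ([PySem.Str.lower query] ++ expanded_terms.map (fun t => PySem.Str.lower t))
  let scored_links := links.foldl (fun acc link =>
      let score := pvScoreA all_terms link
      if score > 0 then acc ++ [(score, link)] else acc) ([] : List (Int × String))
  (PySem.List.sorted scored_links (fun x => x.1) true).map (fun x => x.2)

-- ===== PORT B =====
-- B's arithmetic score: 2 * (number of matching terms) + the two 0/1 bonuses
def pvScoreB (terms : List String) (link : String) : Int :=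
  2 * (terms.countP (fun t => PySem.Str.isIn t (PySem.Str.lower link)) : Int)
  + (if PySem.Str.isIn "?" link then 0 else 1)
  + (if 3 ≤ PySem.Str.count (PySem.Str.lower link) "/" ∧ PySem.Str.count (PySem.Str.lower link) "/" ≤ 5 then 1 else 0)

def filter_relevant_links_alt (links : List String) (query : String) (expanded_terms : List String) : List String :=
  let terms := PySem.Set.ofList ([PySem.Str.lower query] ++ expanded_terms.map (fun t => PySem.Str.lower t))
  let scores := links.map (fun link => pvScoreB terms link)
  let best := PySem.List.maxD scores (fun x => x) 0
  (PySem.List.pyRange best 0 (-1)).flatMap (fun s =>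
    ((links.zip scores).filter (fun p => p.2 == s)).map (fun p => p.1))

-- ===== PRECONDITION & SPEC =====
def Spec_filter_relevant_links (links : List String) (query : String) (expanded_terms : List String) (out : List String) : Prop := out = filter_relevant_links_alt links query expanded_terms
instance (links : List String) (query : String) (expanded_terms : List String) (out : List String) : Decidable (Spec_filter_relevant_links links query expanded_terms out) := by unfold Spec_filter_relevant_links; infer_instance

-- ===== CLAIM (what is proved, stated in full; the proofs are below) =====
def Claim_equal_filter_relevant_links : Prop := ∀ (links : List String) (query : String) (expanded_terms : List String), Dom_filter_relevant_links links query expanded_terms → Spec_filter_relevant_links links query expanded_terms (filter_relevant_links links query expanded_terms)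

-- ===== LEMMAS AND PROOFS =====

-- A's +2-per-hit loop is twice a count
theorem pv_foldl_two_eq_countP (l : List String) (p : String → Bool) (a : Int) :
    l.foldl (fun s t => if p t then s + 2 else s) a = a + 2 * (l.countP p : Int) := by
  induction l generalizing a with
  | nil => simp
  | cons x t ih =>
    simp only [List.foldl_cons, List.countP_cons]
    by_cases hx : p x = true
    · simp only [hx, if_true, ih]
      push_cast
      ring
    · simp only [hx, Bool.false_eq_true, if_false, ih]
      norm_num

-- the two scoring routines agree
theorem pvScore_eq (T : List String) (l : String) : pvScoreA T l = pvScoreB T l := by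
  simp only [pvScoreA, pvScoreB]
  rw [pv_foldl_two_eq_countP]
  split_ifs <;> omega

theorem pvScoreB_nonneg (T : List String) (l : String) : 0 ≤ pvScoreB T l := by
  unfold pvScoreB
  have : (0 : Int) ≤ (T.countP (fun t => PySem.Str.isIn t (PySem.Str.lower l)) : Int) := by positivity
  split_ifs <;> omega

-- insertBy passes over a block it does not go before
theorem pv_insertBy_append {α : Type} (pred : α → α → Bool) (x : α) (B R : List α)
    (h : ∀ b ∈ B, pred x b = false) :
    PySem.List.insertBy pred x (B ++ R) = B ++ PySem.List.insertBy pred x R := by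
  induction B with
  | nil => simp
  | cons b B ih =>
    simp only [List.cons_append, PySem.List.insertBy, h b (by simp)]
    simp only [ih (fun b hb => h b (by simp [hb])), Bool.false_eq_true, if_false]

-- insertBy goes in front of a list it goes before everywhere
theorem pv_insertBy_front {α : Type} (pred : α → α → Bool) (x : α) (L : List α)
    (h : ∀ y ∈ L, pred x y = true) :
    PySem.List.insertBy pred x L = x :: L := by
  cases L with
  | nil => rfl
  | cons y ys => simp [PySem.List.insertBy, h y (by simp)]

theorem pv_flatMap_congr {α β : Type} (l : List α) (f g : α → List β)
    (h : ∀ a ∈ l, f a = g a) : l.flatMap f = l.flatMap g := by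
  induction l with
  | nil => rfl
  | cons a t ih => simp [List.flatMap_cons, h a (by simp), ih (fun a ha => h a (by simp [ha]))]

-- inserting one element into the bucket concatenation lands at the end of its bucket
theorem pv_ins_bucket (ks : List Int) (hk : ks.Pairwise (fun a b => b < a))
    (ys : List (Int × String)) (x : Int × String) (hx : x.1 ∈ ks) :
    PySem.List.insertBy (fun a b => decide (b.1 < a.1)) x
      (ks.flatMap (fun k => ys.filter (fun p => p.1 == k)))
    = ks.flatMap (fun k => (ys ++ [x]).filter (fun p => p.1 == k)) := by
  induction ks with
  | nil => cases hx
  | cons k ks ih =>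
    rw [List.pairwise_cons] at hk
    obtain ⟨hlt, hk'⟩ := hk
    simp only [List.flatMap_cons]
    by_cases hxk : x.1 = k
    · rw [pv_insertBy_append]
      · rw [pv_insertBy_front]
        · have h1 : (ys ++ [x]).filter (fun p => p.1 == k) = ys.filter (fun p => p.1 == k) ++ [x] := by
            simp [List.filter_append, hxk]
          have h2 : ks.flatMap (fun j => (ys ++ [x]).filter (fun p => p.1 == j))
              = ks.flatMap (fun j => ys.filter (fun p => p.1 == j)) := by
            apply pv_flatMap_congr
            intro j hj
            have : x.1 ≠ j := by have := hlt j hj; omega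
            simp [List.filter_append, this]
          rw [h1, h2]; simp
        · intro y hy
          simp only [List.mem_flatMap, List.mem_filter] at hy
          obtain ⟨j, hj, _, hyj⟩ := hy
          have hj' := hlt j hj
          have : y.1 = j := by simpa using hyj
          simp only [decide_eq_true_eq]; omega
      · intro b hb
        simp only [List.mem_filter] at hb
        have : b.1 = k := by simpa using hb.2
        simp only [decide_eq_false_iff_not]; omega
    · have hx' : x.1 ∈ ks := by cases hx with
        | head => exact absurd rfl hxk
        | tail _ h => exact h
      rw [pv_insertBy_append]
      · rw [ih hk' hx']
        have : (ys ++ [x]).filter (fun p => p.1 == k) = ys.filter (fun p => p.1 == k) := by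
          simp [List.filter_append, hxk]
        rw [this]
      · intro b hb
        simp only [List.mem_filter] at hb
        have hb1 : b.1 = k := by simpa using hb.2
        have := hlt x.1 hx'
        simp only [decide_eq_false_iff_not]; omega

theorem pv_foldl_ins (ks : List Int) (hk : ks.Pairwise (fun a b => b < a)) :
    ∀ (xs ys : List (Int × String)), (∀ p ∈ xs, p.1 ∈ ks) →
    xs.foldl (fun acc x => PySem.List.insertBy (fun a b => decide (b.1 < a.1)) x acc)
      (ks.flatMap (fun k => ys.filter (fun p => p.1 == k)))
    = ks.flatMap (fun k => (ys ++ xs).filter (fun p => p.1 == k)) := by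
  intro xs
  induction xs with
  | nil => intro ys _; simp
  | cons x xs ih =>
    intro ys hmem
    simp only [List.foldl_cons]
    rw [pv_ins_bucket ks hk ys x (hmem x (by simp))]
    rw [ih (ys ++ [x]) (fun p hp => hmem p (by simp [hp]))]
    simp

-- the stable descending sort of a keyed list is its bucket concatenation over any
-- strictly decreasing key list covering all keys
theorem pv_sorted_buckets (xs : List (Int × String)) (ks : List Int)
    (hk : ks.Pairwise (fun a b => b < a)) (hx : ∀ p ∈ xs, p.1 ∈ ks) :
    PySem.List.sorted xs (fun x => x.1) true
    = ks.flatMap (fun k => xs.filter (fun p => p.1 == k)) := by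
  rw [PySem.List.sorted_rev_eq_foldl_insertBy]
  have h0 : ks.flatMap (fun k => ([] : List (Int × String)).filter (fun p => p.1 == k)) = [] := by
    simp
  have := pv_foldl_ins ks hk xs [] hx
  rw [h0] at this
  simpa using this

-- Python's max(scores, default=0) is the running max when the scores are nonnegative
theorem pv_maxD_eq_foldl (l : List String) (f : String → Int) (hf : ∀ x, 0 ≤ f x) :
    PySem.List.maxD (l.map f) (fun x => x) 0 = l.foldl (fun e x => max e (f x)) 0 := by
  cases l with
  | nil => rfl
  | cons x t =>
    simp only [List.map_cons, PySem.List.maxD, PySem.List.max?_id_cons, Option.getD_some,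
      List.foldl_cons, List.foldl_map]
    have : max 0 (f x) = f x := by have := hf x; omega
    rw [this]

-- zipping a list with its mapped scores is mapping to pairs
theorem pv_zip_map_self {α β : Type} (l : List α) (f : α → β) :
    l.zip (l.map f) = l.map (fun x => (x, f x)) := by
  induction l with
  | nil => rfl
  | cons x t ih => simp [ih]

-- ===== VERDICT (by name: the statement is the Claim_ definition above) =====
set_option maxHeartbeats 1000000 in
theorem filter_relevant_links_spec : Claim_equal_filter_relevant_links := by
  intro links query expanded_terms _
  unfold Spec_filter_relevant_links filter_relevant_links filter_relevant_links_alt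
  set T := PySem.Set.ofList ([PySem.Str.lower query] ++ expanded_terms.map (fun t => PySem.Str.lower t)) with hT
  set sc := pvScoreB T with hsc
  have hAeq : pvScoreA T = sc := funext (fun l => pvScore_eq T l)
  simp only [hAeq]
  -- characterize A's scored list
  rw [PySem.List.foldl_append_ite (fun link => sc link > 0) (fun link => (sc link, link))]
  set qs := links.filter (fun x => decide (sc x > 0)) with hqs
  set scored := qs.map (fun link => (sc link, link)) with hscored
  simp only [List.nil_append]
  -- B's best score is A's running max over the qualifying links
  set best := PySem.List.maxD (links.map sc) (fun x => x) 0 with hbest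
  have hbest_fold : best = links.foldl (fun e x => max e (sc x)) 0 :=
    pv_maxD_eq_foldl links sc (fun x => pvScoreB_nonneg T x)
  -- keys of scored lie in the descending range
  have hkeys : ∀ p ∈ scored, p.1 ∈ PySem.List.pyRange best 0 (-1) := by
    intro p hp
    rw [hscored] at hp
    simp only [List.mem_map] at hp
    obtain ⟨l, hl, rfl⟩ := hp
    rw [PySem.List.mem_pyRange_neg_one]
    have hpos : sc l > 0 := by
      rw [hqs] at hl; simp only [List.mem_filter, decide_eq_true_eq] at hl; exact hl.2
    have hmem : l ∈ links := by rw [hqs] at hl; exact List.mem_of_mem_filter hl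
    have := (PySem.List.le_foldl_max_int links sc 0).2 l hmem
    rw [hbest_fold]
    exact ⟨hpos, this⟩
  have hdesc : (PySem.List.pyRange best 0 (-1)).Pairwise (fun a b => b < a) := by
    rw [PySem.List.pyRange_neg_one, List.pairwise_map]
    exact List.pairwise_lt_range.imp (by intro a b h; omega)
  rw [pv_sorted_buckets scored (PySem.List.pyRange best 0 (-1)) hdesc hkeys]
  rw [List.map_flatMap, pv_zip_map_self links sc]
  apply pv_flatMap_congr
  intro k hkmem
  have hkpos : 0 < k := (PySem.List.mem_pyRange_neg_one.mp hkmem).1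
  -- both buckets are links.filter (sc · == k)
  rw [hscored, hqs]
  rw [List.filter_map, List.filter_map, List.filter_filter, List.map_map, List.map_map]
  have hcond : links.filter (fun a => ((fun (p : Int × String) => p.1 == k) ∘ fun link => (sc link, link)) a && decide (sc a > 0))
      = links.filter ((fun (p : String × Int) => p.2 == k) ∘ fun x => (x, sc x)) := by
    apply List.filter_congr
    intro x _
    simp only [Function.comp]
    by_cases hx : sc x = k
    · simp [hx, hkpos]
    · simp [hx]
  rw [hcond]
  simp [Function.comp]
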